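-- pv_equiv track=rewrite | github.com/singhshreyash808/Kairos | fusion.py | _mock_classifier
-- ===== SOURCE A (Python) =====
-- def _mock_classifier(grid):
--     # 3-class mock based on intensity thresholds
--     out = []
--     for row in grid:
--         out_row = []
--         for v in row:
--             if v < 60: out_row.append(0)      # water/bare
--             elif v < 160: out_row.append(1)   # vegetation
--             else: out_row.append(2)           # urban
--         out.append(out_row)
--     return out
-- ===== SOURCE B (Python) =====
-- def _mock_classifier(grid):
--     # staged passes: start from an all-zero grid, then one full sweep per
--     # threshold that increments every cell at or above that threshold
--     out = [[0] * len(row) for row in grid]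
--     for t in (60, 160):
--         for i, row in enumerate(grid):
--             for j, v in enumerate(row):
--                 if v >= t:
--                     out[i][j] += 1
--     return out
-- ===== Notes on version B (the rewrite author's own statement) =====
-- stated objective: alternative
-- what changed: Instead of classifying each cell once with an if/elif/else chain, B builds an all-zero result grid and performs one staged sweep per threshold (60 then 160), incrementing every cell at or above it, so the class emerges as a sum of indicator passes.
import Mathlib
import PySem

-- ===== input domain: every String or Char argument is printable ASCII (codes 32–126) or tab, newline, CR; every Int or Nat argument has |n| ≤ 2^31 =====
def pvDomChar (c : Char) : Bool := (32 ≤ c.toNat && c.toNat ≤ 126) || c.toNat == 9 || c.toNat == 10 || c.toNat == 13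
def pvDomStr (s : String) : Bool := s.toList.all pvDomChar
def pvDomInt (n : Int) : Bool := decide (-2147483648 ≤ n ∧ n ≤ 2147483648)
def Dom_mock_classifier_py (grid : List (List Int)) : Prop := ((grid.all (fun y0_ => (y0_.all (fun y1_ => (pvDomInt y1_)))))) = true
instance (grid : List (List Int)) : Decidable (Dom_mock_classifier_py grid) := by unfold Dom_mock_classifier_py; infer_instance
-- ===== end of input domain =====

-- B replaces the per-cell if/elif/else chain by staged threshold sweeps over an all-zero grid (alternative decomposition, same cost).

-- ===== PORT A =====
def mock_classifier_py (grid : List (List Int)) : List (List Int) :=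
  grid.foldl (fun out row =>
    out ++ [row.foldl (fun out_row v =>
      out_row ++ [if v < 60 then (0 : Int) else if v < 160 then 1 else 2]) []]) []

-- ===== PORT B =====
-- one sweep: increment every cell of `out` whose corresponding grid cell is ≥ t
-- (the Python mutates out[i][j] in place; ported as a zip-with over grid and out)
def pvSweep (grid : List (List Int)) (out : List (List Int)) (t : Int) : List (List Int) :=
  (grid.zip out).map (fun p => (p.1.zip p.2).map (fun q => if q.1 ≥ t then q.2 + 1 else q.2))

def pvZeros (grid : List (List Int)) : List (List Int) :=
  grid.map (fun row => row.map (fun _ => (0 : Int)))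

def mock_classifier_py_alt (grid : List (List Int)) : List (List Int) :=
  [(60 : Int), 160].foldl (pvSweep grid) (pvZeros grid)

-- ===== PRECONDITION & SPEC =====
def Spec_mock_classifier_py (grid : List (List Int)) (out : List (List Int)) : Prop := out = mock_classifier_py_alt grid
instance (grid : List (List Int)) (out : List (List Int)) : Decidable (Spec_mock_classifier_py grid out) := by unfold Spec_mock_classifier_py; infer_instance

-- ===== CLAIM (what is proved, stated in full; the proofs are below) =====
def Claim_equal_mock_classifier_py : Prop := ∀ (grid : List (List Int)), Dom_mock_classifier_py grid → Spec_mock_classifier_py grid (mock_classifier_py grid)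

-- ===== LEMMAS AND PROOFS =====
theorem pv_foldl_append_map {α β : Type} (f : α → β) (l : List α) (acc : List β) :
    l.foldl (fun out x => out ++ [f x]) acc = acc ++ l.map f := by
  induction l generalizing acc with
  | nil => simp
  | cons x xs ih => simp [List.foldl, ih]

theorem pv_zip_map_map {α β γ : Type} (g : α → β) (h : α × β → γ) (l : List α) :
    ((l.zip (l.map g)).map h) = l.map (fun a => h (a, g a)) := by
  induction l with
  | nil => rfl
  | cons x xs ih => simpa [List.zip] using ih

theorem pv_sweep_of_map (grid : List (List Int)) (f : Int → Int) (t : Int) :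
    pvSweep grid (grid.map (fun row => row.map f)) t
      = grid.map (fun row => row.map (fun v => if v ≥ t then f v + 1 else f v)) := by
  unfold pvSweep
  rw [pv_zip_map_map]
  congr 1
  funext row
  exact pv_zip_map_map f _ row

theorem pv_cell (v : Int) :
    (if v < 60 then (0 : Int) else if v < 160 then 1 else 2)
      = (if v ≥ 160 then (if v ≥ 60 then (0 : Int) + 1 else 0) + 1 else (if v ≥ 60 then (0 : Int) + 1 else 0)) := by
  split_ifs <;> omega

theorem mock_classifier_py_spec : Claim_equal_mock_classifier_py := by
  intro grid _
  unfold Spec_mock_classifier_py mock_classifier_py mock_classifier_py_alt pvZeros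
  rw [pv_foldl_append_map]
  simp only [List.nil_append, List.foldl]
  rw [pv_sweep_of_map grid (fun _ => (0 : Int)) 60, pv_sweep_of_map grid _ 160]
  congr 1
  funext row
  rw [pv_foldl_append_map]
  simp only [List.nil_append]
  congr 1
  funext v
  exact pv_cell v
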